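-- pv_equiv track=rewrite | github.com/Qualidy/wiki-docker | scripts/intro_gridify.py | wrap_prev_with_image
-- ===== SOURCE A (Python) =====
-- def wrap_prev_with_image(lines, img_rel_path, width="70%"):
--     """Find an image line and wrap the previous non-empty line + this image into a grid."""
--     for i, ln in enumerate(lines):
--         if ln.strip() == f"![]({img_rel_path})":
--             # find previous non-empty line
--             j = i - 1
--             while j >= 0 and not lines[j].strip():
--                 j -= 1
--             if j >= 0:
--                 text = lines[j]
--                 grid = [
--                     '<div class="grid" markdown>',
--                     '',
--                     '<div markdown>',
--                     text,
--                     '',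
--                     '</div>',
--                     '',
--                     '<div markdown>',
--                     f'![]({img_rel_path})' + f'{{ width="{width}" }}',
--                     '',
--                     '</div>',
--                     '',
--                     '</div>',
--                     '',
--                 ]
--                 # replace j..i with grid
--                 return lines[:j] + grid + lines[i + 1 :]
--     return lines
-- ===== SOURCE B (Python) =====
-- def wrap_prev_with_image(lines, img_rel_path, width="70%"):
--     """Single forward pass: remember the most recent non-empty line; on the
--     image line, splice the grid in place of that remembered line .. image line."""
--     target = f"![]({img_rel_path})"
--     last = None  # (index, text) of the most recent non-empty line seen so far
--     for i, ln in enumerate(lines):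
--         if ln.strip() == target and last is not None:
--             j, text = last
--             grid = [
--                 '<div class="grid" markdown>',
--                 '',
--                 '<div markdown>',
--                 text,
--                 '',
--                 '</div>',
--                 '',
--                 '<div markdown>',
--                 target + f'{{ width="{width}" }}',
--                 '',
--                 '</div>',
--                 '',
--                 '</div>',
--                 '',
--             ]
--             return lines[:j] + grid + lines[i + 1:]
--         if ln.strip():
--             last = (i, ln)
--     return lines
-- ===== Notes on version B (the rewrite author's own statement) =====
-- stated objective: alternative
-- what changed: Replaces A's scan-for-image plus backward while-loop over earlier lines by a single forward pass that carries the most recent non-empty line as an (index, text) accumulator, so the inner backward scan and the lines[j] lookup disappear.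
import Mathlib
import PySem

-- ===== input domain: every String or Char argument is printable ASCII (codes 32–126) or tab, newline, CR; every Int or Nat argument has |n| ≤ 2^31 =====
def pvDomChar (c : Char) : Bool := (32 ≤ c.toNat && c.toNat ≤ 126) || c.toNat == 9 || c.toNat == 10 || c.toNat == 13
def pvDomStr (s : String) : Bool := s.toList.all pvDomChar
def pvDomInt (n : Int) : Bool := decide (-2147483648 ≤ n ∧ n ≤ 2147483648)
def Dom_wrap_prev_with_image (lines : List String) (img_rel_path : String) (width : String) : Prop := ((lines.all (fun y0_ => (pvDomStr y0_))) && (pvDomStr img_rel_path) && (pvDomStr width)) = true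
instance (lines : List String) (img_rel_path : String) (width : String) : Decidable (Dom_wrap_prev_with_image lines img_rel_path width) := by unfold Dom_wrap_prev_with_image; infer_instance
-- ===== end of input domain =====

-- B replaces A's find-then-backward-scan by ONE forward pass that remembers the most recent
-- non-empty line (index, text), so no backward while-loop and no lines[j] lookup remain (objective: alternative).

-- ===== PORT A =====
-- A's inner `while j >= 0 and not lines[j].strip(): j -= 1`.  A only calls it with j < len(lines),
-- so `(pyGet? …).getD ""` is exact there (lines[j] never raises in A).
def pvBackscan (lines : List String) (j : Int) : Int :=
  if 0 ≤ j ∧ PySem.Str.strip ((PySem.List.pyGet? lines j).getD "") = "" then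
    pvBackscan lines (j - 1)
  else j
termination_by (j + 1).toNat
decreasing_by omega

-- A's `for i, ln in enumerate(lines)` loop body, step for step.
def pvAGo (lines : List String) (img_rel_path : String) (width : String) : List (Int × String) → List String
  | [] => lines
  | (i, ln) :: rest =>
    if PySem.Str.strip ln = "![](" ++ img_rel_path ++ ")" then
      let j := pvBackscan lines (i - 1)
      if 0 ≤ j then
        let text := (PySem.List.pyGet? lines j).getD ""   -- lines[j]; in range since 0 ≤ j < i
        PySem.List.slice lines none (some j) ++
          ["<div class=\"grid\" markdown>", "", "<div markdown>", text, "", "</div>", "",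
           "<div markdown>", "![](" ++ img_rel_path ++ ")" ++ "{ width=\"" ++ width ++ "\" }", "",
           "</div>", "", "</div>", ""] ++
          PySem.List.slice lines (some (i + 1)) none
      else pvAGo lines img_rel_path width rest
    else pvAGo lines img_rel_path width rest

def wrap_prev_with_image (lines : List String) (img_rel_path : String) (width : String) : List String :=
  pvAGo lines img_rel_path width (PySem.List.enumerate lines)

-- ===== PORT B =====
-- B's single forward pass; `last` is Python's `None | (index, text)` accumulator.
def pvBGo (lines : List String) (img_rel_path : String) (width : String) : List (Int × String) → Option (Int × String) → List String
  | [], _ => lines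
  | (i, ln) :: rest, last =>
    match last with
    | some (j, text) =>
      if PySem.Str.strip ln = "![](" ++ img_rel_path ++ ")" then
        PySem.List.slice lines none (some j) ++
          ["<div class=\"grid\" markdown>", "", "<div markdown>", text, "", "</div>", "",
           "<div markdown>", ("![](" ++ img_rel_path ++ ")") ++ "{ width=\"" ++ width ++ "\" }", "",
           "</div>", "", "</div>", ""] ++
          PySem.List.slice lines (some (i + 1)) none
      else if PySem.Str.strip ln ≠ "" then pvBGo lines img_rel_path width rest (some (i, ln))
      else pvBGo lines img_rel_path width rest (some (j, text))
    | none =>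
      if PySem.Str.strip ln ≠ "" then pvBGo lines img_rel_path width rest (some (i, ln))
      else pvBGo lines img_rel_path width rest none

def wrap_prev_with_image_alt (lines : List String) (img_rel_path : String) (width : String) : List String :=
  pvBGo lines img_rel_path width (PySem.List.enumerate lines) none

-- ===== PRECONDITION & SPEC =====
def Spec_wrap_prev_with_image (lines : List String) (img_rel_path : String) (width : String) (out : List String) : Prop := out = wrap_prev_with_image_alt lines img_rel_path width
instance (lines : List String) (img_rel_path : String) (width : String) (out : List String) : Decidable (Spec_wrap_prev_with_image lines img_rel_path width out) := by unfold Spec_wrap_prev_with_image; infer_instance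

-- ===== CLAIM (what is proved, stated in full; the proofs are below) =====
def Claim_equal_wrap_prev_with_image : Prop := ∀ (lines : List String) (img_rel_path : String) (width : String), Dom_wrap_prev_with_image lines img_rel_path width → Spec_wrap_prev_with_image lines img_rel_path width (wrap_prev_with_image lines img_rel_path width)

-- ===== LEMMAS AND PROOFS =====

lemma pv_target_ne_empty (s : String) : "![](" ++ s ++ ")" ≠ "" := by
  intro h
  have := congrArg String.length h
  simp [String.length_append] at this

-- the invariant relating A's backward scan result to B's accumulator
def pvInv (lines : List String) (k : Nat) (last : Option (Int × String)) : Prop :=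
  match last with
  | none => pvBackscan lines ((k : Int) - 1) < 0
  | some (j, t) => pvBackscan lines ((k : Int) - 1) = j ∧ 0 ≤ j ∧ (PySem.List.pyGet? lines j).getD "" = t

lemma pvBackscan_stop (lines : List String) (j : Int)
    (h : ¬ PySem.Str.strip ((PySem.List.pyGet? lines j).getD "") = "") :
    pvBackscan lines j = j := by
  rw [pvBackscan]; simp [h]

lemma pvBackscan_skip (lines : List String) (j : Int) (h0 : 0 ≤ j)
    (h : PySem.Str.strip ((PySem.List.pyGet? lines j).getD "") = "") :
    pvBackscan lines j = pvBackscan lines (j - 1) := by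
  rw [pvBackscan]; simp [h, h0]

lemma pvBackscan_neg (lines : List String) (j : Int) (h : j < 0) : pvBackscan lines j = j := by
  rw [pvBackscan]; simp [show ¬ 0 ≤ j by omega]

lemma pv_go_eq (lines : List String) (img_rel_path : String) (width : String) :
    ∀ (tl : List String) (k : Nat) (last : Option (Int × String)),
      lines.drop k = tl → pvInv lines k last →
      pvAGo lines img_rel_path width (PySem.List.enumerate tl (k : Int)) =
        pvBGo lines img_rel_path width (PySem.List.enumerate tl (k : Int)) last := by
  intro tl
  induction tl with
  | nil => intro k last _ _; simp [PySem.List.enumerate_nil, pvAGo, pvBGo]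
  | cons ln rest ih =>
    intro k last hdrop hinv
    have hget : PySem.List.pyGet? lines (k : Int) = some ln := by
      rw [PySem.List.pyGet?_natCast]
      have : lines[k]? = (lines.drop k)[0]? := by simp [List.getElem?_drop]
      rw [this, hdrop]; rfl
    have hdrop' : lines.drop (k + 1) = rest := by
      have : lines.drop (k + 1) = (lines.drop k).drop 1 := by
        rw [List.drop_drop]
      rw [this, hdrop]; rfl
    have hcast : ((k : Int) + 1) - 1 = (k : Int) := by omega
    have hcast2 : ((k + 1 : Nat) : Int) = (k : Int) + 1 := by push_cast; ring
    rw [PySem.List.enumerate_cons]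
    by_cases hm : PySem.Str.strip ln = "![](" ++ img_rel_path ++ ")"
    · -- image line matched
      match last with
      | some (j, t) =>
        obtain ⟨hbs, hj0, ht⟩ := hinv
        simp only [pvAGo, pvBGo, hm]
        simp [hbs, hj0, ht]
      | none =>
        have hbs : pvBackscan lines ((k : Int) - 1) < 0 := hinv
        have hA : ¬ (0 ≤ pvBackscan lines ((k : Int) - 1)) := by omega
        have hne : PySem.Str.strip ln ≠ "" := by rw [hm]; exact pv_target_ne_empty _
        have hinv' : pvInv lines (k + 1) (some ((k : Int), ln)) := by
          refine ⟨?_, by positivity, by rw [hget]; rfl⟩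
          rw [hcast2, hcast]
          exact pvBackscan_stop lines (k : Int) (by rw [hget]; simpa using hne)
        have hrec := ih (k + 1) (some ((k : Int), ln)) hdrop' hinv'
        rw [hcast2] at hrec
        simpa [pvAGo, pvBGo, hm, hA, pv_target_ne_empty] using hrec
    · -- not the image line
      by_cases he : PySem.Str.strip ln = ""
      · -- blank line: both keep state
        have hinv' : pvInv lines (k + 1) last := by
          have hskip : pvBackscan lines (k : Int) = pvBackscan lines ((k : Int) - 1) :=
            pvBackscan_skip lines (k : Int) (by positivity) (by rw [hget]; simpa using he)
          match last with
          | none => show pvBackscan lines _ < 0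
                    rw [hcast2, hcast, hskip]; exact hinv
          | some (j, t) =>
            obtain ⟨hbs, hj0, ht⟩ := hinv
            exact ⟨by rw [hcast2, hcast, hskip]; exact hbs, hj0, ht⟩
        have := ih (k + 1) last hdrop' hinv'
        rw [hcast2] at this
        match last with
        | none => simpa [pvAGo, pvBGo, hm, he] using this
        | some (j, t) => simpa [pvAGo, pvBGo, hm, he] using this
      · -- non-empty, non-image: B updates last to (k, ln)
        have hinv' : pvInv lines (k + 1) (some ((k : Int), ln)) := by
          refine ⟨?_, by positivity, by rw [hget]; rfl⟩
          rw [hcast2, hcast]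
          exact pvBackscan_stop lines (k : Int) (by rw [hget]; simpa using he)
        have := ih (k + 1) (some ((k : Int), ln)) hdrop' hinv'
        rw [hcast2] at this
        match last with
        | none => simpa [pvAGo, pvBGo, hm, he] using this
        | some (j, t) => simpa [pvAGo, pvBGo, hm, he] using this

-- ===== VERDICT (by name: the statement is the Claim_ definition above) =====
theorem wrap_prev_with_image_spec : Claim_equal_wrap_prev_with_image := by
  intro lines img_rel_path width _
  show wrap_prev_with_image lines img_rel_path width = wrap_prev_with_image_alt lines img_rel_path width
  unfold wrap_prev_with_image wrap_prev_with_image_alt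
  have h0 : (PySem.List.enumerate lines : List (Int × String)) = PySem.List.enumerate lines (0 : Int) := rfl
  have hinv : pvInv lines 0 none := by
    show pvBackscan lines ((0 : Int) - 1) < 0
    rw [pvBackscan_neg lines _ (by omega)]; omega
  have := pv_go_eq lines img_rel_path width lines 0 none (by simp) hinv
  simpa using this
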